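-- pv_equiv track=rewrite | github.com/lmhale99/iprPy | iprPy/analysis/assign_composition.py | composition_str
-- ===== SOURCE A (Python) =====
-- def composition_str(symbols, counts):
--     """
--     Generates a composition string for a unit cell.
--
--     Parameters
--     ----------
--     symbols : list
--         All element model symbols.
--     count : list
--         How many unique sites are occupied by each symbol.
--
--     Returns
--     -------
--     str
--         The composition string.
--     """
--     primes = [2,3,5,7,11,13,17,19,23,29,31,37,41,43,47]
--
--     sym_dict = {}
--     for i in range(len(symbols)):
--         sym_dict[symbols[i]] = counts[i]
--
--     for prime in primes:
--         if max(sym_dict.values()) < prime: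
--             break
--
--         while True:
--             breaktime = False
--             for value in sym_dict.values():
--                 if value % prime != 0:
--                     breaktime = True
--                     break
--             if breaktime:
--                 break
--             for key in sym_dict:
--                 sym_dict[key] /= prime
--
--     composition =''
--     for key in sorted(sym_dict):
--         if sym_dict[key] > 0:
--             composition += key
--             if sym_dict[key] != 1:
--                 composition += str(int(sym_dict[key]))
--
--     return composition
-- ===== SOURCE B (Python) =====
-- def composition_str(symbols, counts):
--     """Reduce per-symbol counts by the 47-smooth part of their GCD, then
--     build the sorted composition string (same result as the original)."""
--     sym_dict = {s: c for s, c in zip(symbols, counts)}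
--
--     # gcd of all counts (hand-rolled Euclid; the module imports nothing)
--     g = 0
--     for v in sym_dict.values():
--         a, b = g, abs(v)
--         while b:
--             a, b = b, a % b
--         g = a
--
--     # divisor = product of the prime powers <= 47 dividing g
--     d = 1
--     for p in [2, 3, 5, 7, 11, 13, 17, 19, 23, 29, 31, 37, 41, 43, 47]:
--         while g != 0 and g % p == 0:
--             d *= p
--             g //= p
--
--     composition = ''
--     for key in sorted(sym_dict):
--         c = sym_dict[key] // d
--         if c > 0:
--             composition += key
--             if c != 1:
--                 composition += str(c)
--     return composition
-- ===== Notes on version B (the rewrite author's own statement) =====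
-- stated objective: simpler
-- what changed: A strips common prime factors by repeatedly test-dividing every dict value inside a triple-nested loop; B computes the gcd of the values once (hand-rolled Euclid, the module imports nothing), strips the primes <= 47 from that single number to get one divisor d, and divides each value by d in the final string-building pass.
import Mathlib
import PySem

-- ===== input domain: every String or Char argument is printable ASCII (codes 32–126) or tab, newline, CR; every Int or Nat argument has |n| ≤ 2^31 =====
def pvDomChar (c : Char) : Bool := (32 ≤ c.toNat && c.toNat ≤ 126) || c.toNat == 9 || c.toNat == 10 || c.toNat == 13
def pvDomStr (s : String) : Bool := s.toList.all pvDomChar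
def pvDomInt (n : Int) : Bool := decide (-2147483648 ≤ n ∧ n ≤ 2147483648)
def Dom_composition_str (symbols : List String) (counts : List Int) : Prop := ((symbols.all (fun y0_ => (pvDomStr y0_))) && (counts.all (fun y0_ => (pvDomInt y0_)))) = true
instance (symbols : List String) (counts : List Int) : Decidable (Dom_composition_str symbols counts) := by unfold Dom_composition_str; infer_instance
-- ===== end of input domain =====

-- B replaces A's triple-nested "test-divide every dict value by each prime" loop by one gcd of the
-- values (hand-rolled Euclid) whose primes ≤ 47 are stripped into a single divisor; return values agree.

-- ===== PORT A =====

def pvPrimes : List Int := [2,3,5,7,11,13,17,19,23,29,31,37,41,43,47]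

-- for i in range(len(symbols)): sym_dict[symbols[i]] = counts[i]
def pvBuildA (symbols : List String) (counts : List Int) : PySem.Dict String Int :=
  (PySem.List.pyRange 0 (PySem.List.len symbols) 1).foldl
    (fun d i => d.insert (PySem.List.pyGetD symbols i "") (PySem.List.pyGetD counts i 0))
    PySem.Dict.empty

-- A's inner `while True:` — divide every value by prime while all are divisible.  A's `/=` is
-- Python float division, but it only runs when the division is exact and |value| ≤ 2^31 < 2^53,
-- so integer floordiv is exact here.  Fuel: Python's loop is only entered with a positive maximum
-- value, which strictly shrinks each pass; fuel 64 is shown sufficient on Dom in the proofs.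
def pvStripA (p : Int) : Nat → PySem.Dict String Int → PySem.Dict String Int
  | 0, d => d
  | fuel+1, d =>
    if d.values.any (fun v => !(PySem.Int.mod v p == 0)) then d
    else pvStripA p fuel (PySem.Dict.mk (d.items.map (fun kv => (kv.1, PySem.Int.floordiv kv.2 p))))

-- `for prime in primes: if max(...) < prime: break; <while>`; values = [] is Python's
-- ValueError from max(), excluded by Pre_ below.
def pvLoopA : List Int → PySem.Dict String Int → PySem.Dict String Int
  | [], d => d
  | p :: ps, d =>
    match PySem.List.max? d.values id with
    | none => d
    | some m => if m < p then d else pvLoopA ps (pvStripA p 64 d)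

def composition_str (symbols : List String) (counts : List Int) : String :=
  let d := pvLoopA pvPrimes (pvBuildA symbols counts)
  (PySem.List.sorted d.keys id).foldl
    (fun comp key =>
      if 0 < d.getD key 0 then
        let comp2 := comp ++ key
        if !(d.getD key 0 == 1) then comp2 ++ PySem.Int.toStr (d.getD key 0) else comp2
      else comp) ""

-- ===== PORT B =====

-- hand-rolled Euclid of Source B:  a, b = g, abs(v); while b: a, b = b, a % b
def pvEuclid (a b : Int) : Int :=
  if h : b = 0 then a else pvEuclid b (PySem.Int.mod a b)
termination_by b.natAbs
decreasing_by
  rcases lt_or_gt_of_ne h with hb | hb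
  · have h1 := (PySem.Int.mod_neg_bounds a hb).1
    have h2 := (PySem.Int.mod_neg_bounds a hb).2
    omega
  · have h1 := PySem.Int.mod_nonneg a hb
    have h2 := PySem.Int.mod_lt a hb
    omega

-- g = 0; for v in sym_dict.values(): g = euclid(g, abs(v))
def pvGcdB (vs : List Int) : Int := vs.foldl (fun g v => pvEuclid g |v|) 0

-- while g != 0 and g % p == 0: d *= p; g //= p   (fuel 64, sufficient on Dom)
def pvStripB (p : Int) : Nat → Int → Int → Int × Int
  | 0, g, d => (g, d)
  | fuel+1, g, d =>
    if !(g == 0) && (PySem.Int.mod g p == 0)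
    then pvStripB p fuel (PySem.Int.floordiv g p) (d * p)
    else (g, d)

def pvLoopB (ps : List Int) (g : Int) : Int × Int :=
  ps.foldl (fun gd p => pvStripB p 64 gd.1 gd.2) (g, 1)

def composition_str_alt (symbols : List String) (counts : List Int) : String :=
  let sd := (symbols.zip counts).foldl (fun d sc => d.insert sc.1 sc.2) PySem.Dict.empty
  let dd := (pvLoopB pvPrimes (pvGcdB sd.values)).2
  (PySem.List.sorted sd.keys id).foldl
    (fun comp key =>
      let c := PySem.Int.floordiv (sd.getD key 0) dd
      if 0 < c then
        let comp2 := comp ++ key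
        if !(c == 1) then comp2 ++ PySem.Int.toStr c else comp2
      else comp) ""

-- ===== PRECONDITION & SPEC =====

-- A raises ValueError (max of an empty sequence) when symbols is empty and IndexError when counts
-- is shorter than symbols; exactly those inputs are excluded.
def Pre_composition_str (symbols : List String) (counts : List Int) : Prop :=
  symbols ≠ [] ∧ symbols.length ≤ counts.length
instance (symbols : List String) (counts : List Int) : Decidable (Pre_composition_str symbols counts) := by
  unfold Pre_composition_str; infer_instance

def pvWitness_composition_str : List String × List Int := (["Al", "O"], [4, 6])

def Spec_composition_str (symbols : List String) (counts : List Int) (out : String) : Prop :=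
  out = composition_str_alt symbols counts
instance (symbols : List String) (counts : List Int) (out : String) : Decidable (Spec_composition_str symbols counts out) := by
  unfold Spec_composition_str; infer_instance

-- ===== CLAIM (what is proved, stated in full; the proofs are below) =====
def Claim_equal_composition_str : Prop := ∀ (symbols : List String) (counts : List Int), Dom_composition_str symbols counts → Pre_composition_str symbols counts → Spec_composition_str symbols counts (composition_str symbols counts)


-- ===== LEMMAS AND PROOFS =====

-- divide every value by P
def pvMapVals (P : Int) (d : PySem.Dict String Int) : PySem.Dict String Int :=
  PySem.Dict.mk (d.items.map (fun kv => (kv.1, PySem.Int.floordiv kv.2 P)))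

theorem pv_floordiv_one (v : Int) : PySem.Int.floordiv v 1 = v := by
  rw [PySem.Int.floordiv_eq_ediv_of_pos one_pos]; exact Int.ediv_one v

theorem pv_mapVals_one (d : PySem.Dict String Int) : pvMapVals 1 d = d := by
  apply PySem.Dict.ext
  show d.items.map (fun kv => (kv.1, PySem.Int.floordiv kv.2 1)) = d.items
  simp only [pv_floordiv_one]
  simp

theorem pv_build_go : ∀ (ss : List String) (cs : List Int) (d : PySem.Dict String Int),
    ss.length ≤ cs.length →
    (List.range ss.length).foldl (fun d k => d.insert (ss.getD k "") (cs.getD k 0)) d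
      = (ss.zip cs).foldl (fun d sc => d.insert sc.1 sc.2) d := by
  intro ss
  induction ss with
  | nil => intro cs d _; simp
  | cons s ss ih =>
    intro cs d h
    cases cs with
    | nil => simp at h
    | cons c cs =>
      simp only [List.length_cons, List.range_succ_eq_map, List.foldl_cons, List.foldl_map,
        List.getD_cons_zero, List.getD_cons_succ, List.zip_cons_cons]
      exact ih cs (d.insert s c) (by simpa using h)

theorem pv_build_eq (symbols : List String) (counts : List Int)
    (h : symbols.length ≤ counts.length) :
    pvBuildA symbols counts
      = (symbols.zip counts).foldl (fun d sc => d.insert sc.1 sc.2) PySem.Dict.empty := by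
  unfold pvBuildA
  rw [PySem.List.len_eq, PySem.List.pyRange_zero]
  simp only [Int.toNat_natCast, List.foldl_map, PySem.List.pyGetD_natCast]
  exact pv_build_go symbols counts PySem.Dict.empty h

theorem pv_gcd_step (a b : Int) : Int.gcd a b = Int.gcd b (a % b) := by
  apply Nat.dvd_antisymm
  · have hmod : (↑(Int.gcd a b) : Int) ∣ a % b := by
      rw [Int.emod_def]
      exact dvd_sub (Int.gcd_dvd_left a b) (Dvd.dvd.mul_right (Int.gcd_dvd_right a b) _)
    exact Int.natCast_dvd_natCast.mp (Int.dvd_coe_gcd (Int.gcd_dvd_right a b) hmod)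
  · refine Int.natCast_dvd_natCast.mp (Int.dvd_coe_gcd ?_ (Int.gcd_dvd_left b (a % b)))
    have hsum : a % b + b * (a / b) = a := Int.emod_add_ediv a b
    calc (↑(Int.gcd b (a % b)) : Int) ∣ a % b + b * (a / b) :=
          dvd_add (Int.gcd_dvd_right b (a % b)) (Dvd.dvd.mul_right (Int.gcd_dvd_left b (a % b)) _)
      _ = a := hsum

theorem pv_euclid_aux : ∀ (n : Nat) (b a : Int), 0 ≤ a → 0 ≤ b → b.toNat ≤ n →
    pvEuclid a b = (Int.gcd a b : Int)
  | n, b, a, ha, hb, hn => by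
    by_cases h : b = 0
    · subst h
      rw [pvEuclid]
      simp [Int.gcd, Int.natAbs_of_nonneg ha]
    · have hb' : 0 < b := lt_of_le_of_ne hb (Ne.symm h)
      match n with
      | 0 => omega
      | n+1 =>
        rw [pvEuclid, dif_neg h, PySem.Int.mod_eq_emod_of_pos hb']
        have h1 : 0 ≤ a % b := Int.emod_nonneg a (by omega)
        have h2 : a % b < b := Int.emod_lt_of_pos a hb'
        rw [pv_euclid_aux n (a % b) b hb h1 (by omega)]
        exact congrArg Nat.cast (pv_gcd_step a b).symm

theorem pv_euclid_eq (a b : Int) (ha : 0 ≤ a) (hb : 0 ≤ b) :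
    pvEuclid a b = (Int.gcd a b : Int) := pv_euclid_aux b.toNat b a ha hb le_rfl

theorem pv_gfold (vs : List Int) : ∀ (a : Int), 0 ≤ a →
    0 ≤ vs.foldl (fun g v => pvEuclid g |v|) a ∧
    (vs.foldl (fun g v => pvEuclid g |v|) a) ∣ a ∧
    (∀ v ∈ vs, (vs.foldl (fun g v => pvEuclid g |v|) a) ∣ v) ∧
    (∀ c : Int, c ∣ a → (∀ v ∈ vs, c ∣ v) → c ∣ vs.foldl (fun g v => pvEuclid g |v|) a) := by
  induction vs with
  | nil =>
    intro a ha
    exact ⟨ha, dvd_refl a, by simp, fun c hc _ => hc⟩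
  | cons v vs ih =>
    intro a ha
    have hstep : pvEuclid a |v| = ((Int.gcd a v : Nat) : Int) := by
      rw [pv_euclid_eq a |v| ha (abs_nonneg v)]
      rw [Int.gcd_def, Int.gcd_def, Int.natAbs_abs]
    simp only [List.foldl_cons, hstep]
    obtain ⟨h0, hdA, hdAll, hgreat⟩ := ih ((Int.gcd a v : Nat) : Int) (Int.natCast_nonneg _)
    refine ⟨h0, dvd_trans hdA (Int.gcd_dvd_left a v), ?_, ?_⟩
    · intro w hw
      rcases List.mem_cons.mp hw with hw | hw
      · subst hw; exact dvd_trans hdA (Int.gcd_dvd_right a w)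
      · exact hdAll w hw
    · intro c hca hcall
      exact hgreat c (Int.dvd_coe_gcd hca (hcall v (List.mem_cons_self))) 
        (fun w hw => hcall w (List.mem_cons_of_mem v hw))

theorem pv_gcdB_nonneg (vs : List Int) : 0 ≤ pvGcdB vs := (pv_gfold vs 0 le_rfl).1
theorem pv_gcdB_dvd (vs : List Int) : ∀ v ∈ vs, pvGcdB vs ∣ v := (pv_gfold vs 0 le_rfl).2.2.1
theorem pv_dvd_gcdB (vs : List Int) (c : Int) (h : ∀ v ∈ vs, c ∣ v) : c ∣ pvGcdB vs :=
  (pv_gfold vs 0 le_rfl).2.2.2 c (dvd_zero c) h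

theorem pv_stripB_acc (p : Int) : ∀ (fuel : Nat) (g d : Int),
    pvStripB p fuel g d = ((pvStripB p fuel g 1).1, d * (pvStripB p fuel g 1).2) := by
  intro fuel
  induction fuel with
  | zero => intro g d; simp [pvStripB]
  | succ fuel ih =>
    intro g d
    show (if !(g == 0) && (PySem.Int.mod g p == 0)
        then pvStripB p fuel (PySem.Int.floordiv g p) (d * p) else (g, d))
      = ((pvStripB p (fuel+1) g 1).1, d * (pvStripB p (fuel+1) g 1).2)
    by_cases hc : (!(g == 0) && (PySem.Int.mod g p == 0)) = true
    · rw [if_pos hc]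
      have hr : pvStripB p (fuel+1) g 1 = pvStripB p fuel (PySem.Int.floordiv g p) (1 * p) := by
        show (if !(g == 0) && (PySem.Int.mod g p == 0)
            then pvStripB p fuel (PySem.Int.floordiv g p) (1 * p) else (g, 1))
          = pvStripB p fuel (PySem.Int.floordiv g p) (1 * p)
        rw [if_pos hc]
      rw [hr, ih (PySem.Int.floordiv g p) (d * p), ih (PySem.Int.floordiv g p) (1 * p)]
      refine Prod.ext rfl ?_
      show d * p * _ = d * (1 * p * _)
      ring
    · rw [if_neg hc]
      have hr : pvStripB p (fuel+1) g 1 = (g, 1) := by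
        show (if !(g == 0) && (PySem.Int.mod g p == 0)
            then pvStripB p fuel (PySem.Int.floordiv g p) (1 * p) else (g, 1)) = (g, 1)
        rw [if_neg hc]
      rw [hr]
      exact Prod.ext rfl (by ring)

theorem pv_values_mapVals (P : Int) (d : PySem.Dict String Int) :
    (pvMapVals P d).values = d.values.map (fun v => PySem.Int.floordiv v P) := by
  show ((d.items.map (fun kv => (kv.1, PySem.Int.floordiv kv.2 P))).map (fun x => x.2))
      = (d.items.map (fun x => x.2)).map (fun v => PySem.Int.floordiv v P)
  simp [List.map_map]

theorem pv_keys_mapVals (P : Int) (d : PySem.Dict String Int) :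
    (pvMapVals P d).keys = d.keys := by
  show ((d.items.map (fun kv => (kv.1, PySem.Int.floordiv kv.2 P))).map (fun x => x.1))
      = d.items.map (fun x => x.1)
  simp [List.map_map]

theorem pv_mapVals_mapVals (P Q : Int) (hP : 0 < P) (hQ : 0 < Q) (d : PySem.Dict String Int) :
    pvMapVals Q (pvMapVals P d) = pvMapVals (P * Q) d := by
  apply PySem.Dict.ext
  show ((d.items.map (fun kv => (kv.1, PySem.Int.floordiv kv.2 P))).map
          (fun kv => (kv.1, PySem.Int.floordiv kv.2 Q)))
      = d.items.map (fun kv => (kv.1, PySem.Int.floordiv kv.2 (P * Q)))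
  rw [List.map_map]
  apply List.map_congr_left
  intro kv _
  simp only [Function.comp]
  rw [PySem.Int.floordiv_eq_ediv_of_pos hP, PySem.Int.floordiv_eq_ediv_of_pos hQ,
    PySem.Int.floordiv_eq_ediv_of_pos (mul_pos hP hQ), Int.ediv_ediv_eq_ediv_mul (le_of_lt hP)]

theorem pv_stripA_succ (p : Int) (fuel : Nat) (d : PySem.Dict String Int) :
    pvStripA p (fuel+1) d =
      if d.values.any (fun v => !(PySem.Int.mod v p == 0)) then d
      else pvStripA p fuel (pvMapVals p d) := rfl

theorem pv_stripB_succ (p : Int) (fuel : Nat) (g acc : Int) :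
    pvStripB p (fuel+1) g acc =
      if !(g == 0) && (PySem.Int.mod g p == 0)
      then pvStripB p fuel (PySem.Int.floordiv g p) (acc * p) else (g, acc) := rfl

theorem pv_lockstep (p : Int) (hp : 2 ≤ p) :
    ∀ (fuel : Nat) (g : Int) (d : PySem.Dict String Int), 0 < g → g.toNat < 2^fuel →
    (∀ v ∈ d.values, g ∣ v) → (∀ c : Int, (∀ v ∈ d.values, c ∣ v) → c ∣ g) →
    0 < (pvStripB p fuel g 1).2 ∧ (pvStripB p fuel g 1).2 ∣ g ∧
      (pvStripB p fuel g 1).1 = g / (pvStripB p fuel g 1).2 ∧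
      pvStripA p fuel d = pvMapVals (pvStripB p fuel g 1).2 d := by
  intro fuel
  induction fuel with
  | zero => intro g d hg hlt _ _; omega
  | succ fuel ih =>
    intro g d hg hlt hdv hgr
    have hp0 : (0:Int) < p := by omega
    by_cases hpd : p ∣ g
    · obtain ⟨k, hk⟩ := hpd
      have hk0 : 0 < k := by nlinarith [hk ▸ hg, hp0]
      have hfd : PySem.Int.floordiv g p = k := by
        rw [PySem.Int.floordiv_eq_ediv_of_pos hp0, hk, Int.mul_ediv_cancel_left k (by omega)]
      have hall : ∀ v ∈ d.values, (PySem.Int.mod v p == 0) = true := by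
        intro v hv
        simp only [beq_iff_eq]
        exact (PySem.Int.mod_eq_zero_iff_dvd v p).mpr (dvd_trans ⟨k, hk⟩ (hdv v hv))
      have hanyf : (d.values.any (fun v => !(PySem.Int.mod v p == 0))) = false := by
        rw [List.any_eq_false]
        intro v hv
        simp [hall v hv]
      have hA : pvStripA p (fuel+1) d = pvStripA p fuel (pvMapVals p d) := by
        rw [pv_stripA_succ, hanyf]
        simp
      have hcond : (!(g == 0) && (PySem.Int.mod g p == 0)) = true := by
        simp only [Bool.and_eq_true, Bool.not_eq_true', beq_eq_false_iff_ne, beq_iff_eq]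
        exact ⟨by omega, (PySem.Int.mod_eq_zero_iff_dvd g p).mpr ⟨k, hk⟩⟩
      have hB : pvStripB p (fuel+1) g 1
          = ((pvStripB p fuel k 1).1, 1 * p * (pvStripB p fuel k 1).2) := by
        rw [pv_stripB_succ, if_pos hcond, hfd, pv_stripB_acc p fuel k (1 * p)]
      -- invariants for the recursive call on (k, pvMapVals p d)
      have hklt : k.toNat < 2^fuel := by
        have h2k : 2 * k ≤ p * k := mul_le_mul_of_nonneg_right hp (by omega)
        have hpow : (2:Nat)^(fuel+1) = 2 * 2^fuel := by ring
        omega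
      have hdv' : ∀ v' ∈ (pvMapVals p d).values, k ∣ v' := by
        intro v' hv'
        rw [pv_values_mapVals] at hv'
        obtain ⟨v, hv, rfl⟩ := List.mem_map.mp hv'
        rw [PySem.Int.floordiv_eq_ediv_of_pos hp0]
        have := Int.ediv_dvd_ediv ⟨k, hk⟩ (hdv v hv)
        rwa [hk, Int.mul_ediv_cancel_left k (by omega)] at this
      have hgr' : ∀ c : Int, (∀ v' ∈ (pvMapVals p d).values, c ∣ v') → c ∣ k := by
        intro c hc
        have hcp : c * p ∣ g := by
          apply hgr
          intro v hv
          have hpv : p ∣ v := dvd_trans ⟨k, hk⟩ (hdv v hv)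
          obtain ⟨w, hw⟩ := hpv
          have hcw : c ∣ w := by
            have hmem : PySem.Int.floordiv v p ∈ (pvMapVals p d).values := by
              rw [pv_values_mapVals]
              exact List.mem_map.mpr ⟨v, hv, rfl⟩
            have := hc _ hmem
            rwa [PySem.Int.floordiv_eq_ediv_of_pos hp0, hw,
              Int.mul_ediv_cancel_left w (by omega)] at this
          obtain ⟨u, hu⟩ := hcw
          exact ⟨u, by rw [hw, hu]; ring⟩
        obtain ⟨u, hu⟩ := hcp
        refine ⟨u, mul_left_cancel₀ (show p ≠ 0 by omega) ?_⟩
        rw [← hk, hu]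
        ring
      obtain ⟨hP', hPd', hS1, hA'⟩ := ih k (pvMapVals p d) hk0 hklt hdv' hgr'
      rw [hA, hB, hA']
      refine ⟨by positivity, ?_, ?_, ?_⟩
      · rw [hk, one_mul]
        exact mul_dvd_mul_left p hPd'
      · show (pvStripB p fuel k 1).1 = g / (1 * p * (pvStripB p fuel k 1).2)
        rw [hS1, one_mul, hk, ← Int.ediv_ediv_eq_ediv_mul (le_of_lt hp0),
          Int.mul_ediv_cancel_left k (by omega)]
      · show pvMapVals (pvStripB p fuel k 1).2 (pvMapVals p d) = pvMapVals (1 * p * (pvStripB p fuel k 1).2) d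
        rw [pv_mapVals_mapVals p _ hp0 hP', one_mul]
    · have hcond : (!(g == 0) && (PySem.Int.mod g p == 0)) = false := by
        simp only [Bool.and_eq_false_iff, beq_iff_eq]
        right
        simpa [PySem.Int.mod_eq_zero_iff_dvd] using hpd
      have hB : pvStripB p (fuel+1) g 1 = (g, 1) := by
        rw [pv_stripB_succ, if_neg (by simp [hcond])]
      have hex : ∃ v ∈ d.values, ¬ p ∣ v := by
        by_contra hno
        push_neg at hno
        exact hpd (hgr p hno)
      have hanyt : (d.values.any (fun v => !(PySem.Int.mod v p == 0))) = true := by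
        rw [List.any_eq_true]
        obtain ⟨v, hv, hnd⟩ := hex
        exact ⟨v, hv, by simp [PySem.Int.mod_eq_zero_iff_dvd, hnd]⟩
      have hA : pvStripA p (fuel+1) d = d := by
        rw [pv_stripA_succ, hanyt]
        simp
      rw [hA, hB]
      exact ⟨one_pos, one_dvd g, (Int.ediv_one g).symm, (pv_mapVals_one d).symm⟩

theorem pv_stripB_noop (q g acc : Int) (hg : 0 < g) (hlt : g < q) :
    pvStripB q 64 g acc = (g, acc) := by
  have hnd : ¬ q ∣ g := fun hd => absurd (Int.le_of_dvd hg hd) (by omega)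
  rw [show (64:Nat) = 63+1 from rfl, pv_stripB_succ]
  rw [if_neg]
  simp only [Bool.and_eq_true, Bool.not_eq_true', beq_iff_eq, not_and]
  intro _
  simpa [PySem.Int.mod_eq_zero_iff_dvd] using hnd

theorem pv_bnoop : ∀ (ps : List Int) (g acc : Int), 0 < g → (∀ q ∈ ps, g < q) →
    ps.foldl (fun gd q => pvStripB q 64 gd.1 gd.2) (g, acc) = (g, acc) := by
  intro ps
  induction ps with
  | nil => intro g acc _ _; rfl
  | cons q ps ih =>
    intro g acc hg hall
    rw [List.foldl_cons]
    show ps.foldl _ (pvStripB q 64 g acc) = (g, acc)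
    rw [pv_stripB_noop q g acc hg (hall q List.mem_cons_self)]
    exact ih g acc hg (fun r hr => hall r (List.mem_cons_of_mem q hr))

theorem pv_stripB_pos (p : Int) (hp : 0 < p) :
    ∀ (fuel : Nat) (g acc : Int), 0 < acc → 0 < (pvStripB p fuel g acc).2 := by
  intro fuel
  induction fuel with
  | zero => intro g acc h; exact h
  | succ fuel ih =>
    intro g acc h
    rw [pv_stripB_succ]
    split
    · exact ih _ _ (mul_pos h hp)
    · exact h

theorem pv_loopB_pos : ∀ (ps : List Int), (∀ q ∈ ps, 0 < q) → ∀ (g acc : Int), 0 < acc →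
    0 < (ps.foldl (fun gd q => pvStripB q 64 gd.1 gd.2) (g, acc)).2 := by
  intro ps
  induction ps with
  | nil => intro _ g acc h; exact h
  | cons q ps ih =>
    intro hall g acc h
    rw [List.foldl_cons]
    have h1 : 0 < (pvStripB q 64 g acc).2 :=
      pv_stripB_pos q (hall q List.mem_cons_self) 64 g acc h
    have := ih (fun r hr => hall r (List.mem_cons_of_mem q hr)) (pvStripB q 64 g acc).1
      (pvStripB q 64 g acc).2 h1
    simpa using this

theorem pv_quot_invs (P g : Int) (d : PySem.Dict String Int) (hP : 0 < P) (hPd : P ∣ g)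
    (hdv : ∀ v ∈ d.values, g ∣ v) (hgr : ∀ c : Int, (∀ v ∈ d.values, c ∣ v) → c ∣ g) :
    (∀ v' ∈ (pvMapVals P d).values, g / P ∣ v') ∧
    (∀ c : Int, (∀ v' ∈ (pvMapVals P d).values, c ∣ v') → c ∣ g / P) := by
  obtain ⟨k, hk⟩ := hPd
  have hP0 : P ≠ 0 := by omega
  have hgq : g / P = k := by rw [hk, Int.mul_ediv_cancel_left k hP0]
  constructor
  · intro v' hv'
    rw [pv_values_mapVals] at hv'
    obtain ⟨v, hv, rfl⟩ := List.mem_map.mp hv'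
    rw [PySem.Int.floordiv_eq_ediv_of_pos hP, hgq]
    have := Int.ediv_dvd_ediv ⟨k, hk⟩ (hdv v hv)
    rwa [hk, Int.mul_ediv_cancel_left k hP0] at this
  · intro c hc
    have hcp : c * P ∣ g := by
      apply hgr
      intro v hv
      have hPv : P ∣ v := dvd_trans ⟨k, hk⟩ (hdv v hv)
      obtain ⟨w, hw⟩ := hPv
      have hcw : c ∣ w := by
        have hmem : PySem.Int.floordiv v P ∈ (pvMapVals P d).values := by
          rw [pv_values_mapVals]
          exact List.mem_map.mpr ⟨v, hv, rfl⟩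
        have := hc _ hmem
        rwa [PySem.Int.floordiv_eq_ediv_of_pos hP, hw,
          Int.mul_ediv_cancel_left w hP0] at this
      obtain ⟨u, hu⟩ := hcw
      exact ⟨u, by rw [hw, hu]; ring⟩
    obtain ⟨u, hu⟩ := hcp
    rw [hgq]
    refine ⟨u, mul_left_cancel₀ hP0 ?_⟩
    rw [← hk, hu]
    ring

theorem pv_outer :
    ∀ (ps : List Int), (∀ q ∈ ps, 2 ≤ q) → List.Pairwise (· ≤ ·) ps →
    ∀ (d : PySem.Dict String Int) (g : Int), 0 ≤ g → g.toNat < 2^64 →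
    (∀ v ∈ d.values, g ∣ v) → (∀ c : Int, (∀ v ∈ d.values, c ∣ v) → c ∣ g) →
    (∃ v ∈ d.values, 0 < v) →
    ∀ acc : Int, ∃ P : Int, 0 < P ∧ P ∣ g ∧
      ps.foldl (fun gd q => pvStripB q 64 gd.1 gd.2) (g, acc) = (g / P, acc * P) ∧
      pvLoopA ps d = pvMapVals P d := by
  intro ps
  induction ps with
  | nil =>
    intro _ _ d g _ _ _ _ _ acc
    exact ⟨1, one_pos, one_dvd g, by simp, (pv_mapVals_one d).symm⟩
  | cons p ps ih =>
    intro hall hsort d g hg0 hglt hdv hgr hpos acc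
    have hp : 2 ≤ p := hall p List.mem_cons_self
    obtain ⟨v0, hv0m, hv0⟩ := hpos
    have hgne : g ≠ 0 := by
      rintro rfl
      have := hdv v0 hv0m
      rw [zero_dvd_iff] at this
      omega
    have hgpos : 0 < g := lt_of_le_of_ne hg0 (Ne.symm hgne)
    obtain ⟨m, hm⟩ : ∃ m, PySem.List.max? d.values id = some m := by
      cases h : PySem.List.max? d.values id with
      | none =>
        rw [PySem.List.max?_eq_none_iff] at h
        exact absurd (h ▸ hv0m) (List.not_mem_nil)
      | some m => exact ⟨m, rfl⟩
    have hmmax : ∀ x ∈ d.values, x ≤ m := fun x hx => PySem.List.max?_isMax hm x hx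
    have hm0 : 0 < m := lt_of_lt_of_le hv0 (hmmax v0 hv0m)
    have hLA : pvLoopA (p::ps) d = if m < p then d else pvLoopA ps (pvStripA p 64 d) := by
      show (match PySem.List.max? d.values id with
        | none => d
        | some m => if m < p then d else pvLoopA ps (pvStripA p 64 d)) = _
      rw [hm]
    by_cases hbr : m < p
    · have hgm : g ≤ m := Int.le_of_dvd hm0 (hdv m (PySem.List.max?_mem hm))
      have hlt : ∀ q ∈ p :: ps, g < q := by
        intro q hq
        rcases List.mem_cons.mp hq with rfl | hq
        · omega
        · have := (List.pairwise_cons.mp hsort).1 q hq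
          omega
      refine ⟨1, one_pos, one_dvd g, ?_, ?_⟩
      · rw [pv_bnoop (p::ps) g acc hgpos hlt]
        simp
      · rw [hLA, if_pos hbr, pv_mapVals_one]
    · obtain ⟨hP1, hP1d, hS1, hA1⟩ := pv_lockstep p hp 64 g d hgpos hglt hdv hgr
      have hBf : (p::ps).foldl (fun gd q => pvStripB q 64 gd.1 gd.2) (g, acc)
          = ps.foldl (fun gd q => pvStripB q 64 gd.1 gd.2)
              (g / (pvStripB p 64 g 1).2, acc * (pvStripB p 64 g 1).2) := by
        rw [List.foldl_cons]
        congr 1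
        show pvStripB p 64 g acc = _
        rw [pv_stripB_acc p 64 g acc, hS1]
      obtain ⟨hdv', hgr'⟩ := pv_quot_invs (pvStripB p 64 g 1).2 g d hP1 hP1d hdv hgr
      have hg'0 : 0 ≤ g / (pvStripB p 64 g 1).2 := Int.ediv_nonneg (le_of_lt hgpos) (le_of_lt hP1)
      have hg'lt : (g / (pvStripB p 64 g 1).2).toNat < 2^64 := by
        have := Int.ediv_le_self (pvStripB p 64 g 1).2 (le_of_lt hgpos)
        omega
      have hpos' : ∃ v ∈ (pvMapVals (pvStripB p 64 g 1).2 d).values, 0 < v := by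
        have hPv0 : (pvStripB p 64 g 1).2 ∣ v0 := dvd_trans hP1d (hdv v0 hv0m)
        obtain ⟨u, hu⟩ := hPv0
        refine ⟨PySem.Int.floordiv v0 (pvStripB p 64 g 1).2, ?_, ?_⟩
        · rw [pv_values_mapVals]
          exact List.mem_map.mpr ⟨v0, hv0m, rfl⟩
        · rw [PySem.Int.floordiv_eq_ediv_of_pos hP1, hu,
            Int.mul_ediv_cancel_left u (by omega)]
          nlinarith [hu ▸ hv0]
      obtain ⟨P₂, hP2, hP2d, hBf2, hA2⟩ := ih (fun q hq => hall q (List.mem_cons_of_mem p hq))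
        (List.pairwise_cons.mp hsort).2 (pvMapVals (pvStripB p 64 g 1).2 d)
        (g / (pvStripB p 64 g 1).2) hg'0 hg'lt hdv' hgr' hpos' (acc * (pvStripB p 64 g 1).2)
      refine ⟨(pvStripB p 64 g 1).2 * P₂, mul_pos hP1 hP2, ?_, ?_, ?_⟩
      · obtain ⟨w, hw⟩ := hP2d
        have hg1 : g / (pvStripB p 64 g 1).2 * (pvStripB p 64 g 1).2 = g :=
          Int.ediv_mul_cancel hP1d
        refine ⟨w, ?_⟩
        calc g = g / (pvStripB p 64 g 1).2 * (pvStripB p 64 g 1).2 := hg1.symm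
          _ = (P₂ * w) * (pvStripB p 64 g 1).2 := by rw [hw]
          _ = (pvStripB p 64 g 1).2 * P₂ * w := by ring
      · rw [hBf, hBf2, Int.ediv_ediv_eq_ediv_mul (le_of_lt hP1), mul_assoc]
      · rw [hLA, if_neg hbr, hA1, hA2, pv_mapVals_mapVals _ _ hP1 hP2]

theorem pv_get?_map (P : Int) : ∀ (l : List (String × Int)) (k : String),
    (PySem.Dict.mk (l.map (fun kv => (kv.1, PySem.Int.floordiv kv.2 P)))).get? k
      = ((PySem.Dict.mk l).get? k).map (fun v => PySem.Int.floordiv v P) := by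
  intro l
  induction l with
  | nil => intro k; rfl
  | cons kv l ih =>
    intro k
    obtain ⟨a, b⟩ := kv
    simp only [List.map_cons, PySem.Dict.get?_mk_cons]
    by_cases h : (a == k) = true
    · simp [h]
    · simp only [Bool.not_eq_true] at h
      simp [h, ih k]

theorem pv_get?_mapVals (P : Int) (d : PySem.Dict String Int) (k : String) :
    (pvMapVals P d).get? k = (d.get? k).map (fun v => PySem.Int.floordiv v P) := by
  obtain ⟨l⟩ := d
  exact pv_get?_map P l k

theorem pv_get?_of_mem_keys (d : PySem.Dict String Int) (k : String) (hk : k ∈ d.keys) :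
    ∃ v, d.get? k = some v := by
  cases h : d.get? k with
  | none => exact absurd hk ((PySem.Dict.get?_eq_none_iff_not_mem_keys d k).mp h)
  | some v => exact ⟨v, rfl⟩

theorem pv_get?_mem_values : ∀ (l : List (String × Int)) (k : String) (v : Int),
    (PySem.Dict.mk l).get? k = some v → v ∈ (PySem.Dict.mk l).values := by
  intro l
  induction l with
  | nil =>
    intro k v h
    rw [show (PySem.Dict.mk ([] : List (String × Int))).get? k = none from rfl] at h
    cases h
  | cons kv l ih =>
    intro k v h
    obtain ⟨a, b⟩ := kv
    rw [PySem.Dict.get?_mk_cons] at h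
    by_cases hk : (a == k) = true
    · rw [if_pos hk] at h
      simp only [Option.some_inj] at h
      subst h
      simp [PySem.Dict.values_mk]
    · rw [if_neg hk] at h
      have := ih k v h
      simp only [PySem.Dict.values_mk] at this ⊢
      simpa using Or.inr (by simpa using this)

theorem pv_getD_mapVals (P : Int) (d : PySem.Dict String Int) (k : String) (hk : k ∈ d.keys) :
    (pvMapVals P d).getD k 0 = PySem.Int.floordiv (d.getD k 0) P := by
  obtain ⟨v, hv⟩ := pv_get?_of_mem_keys d k hk
  rw [PySem.Dict.getD_eq_get?_getD, PySem.Dict.getD_eq_get?_getD, pv_get?_mapVals, hv]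
  rfl

theorem pv_compose_eq (d : PySem.Dict String Int) (P : Int) (hP : 0 < P)
    (hdv : ∀ v ∈ d.values, P ∣ v) :
    (PySem.List.sorted (pvMapVals P d).keys id).foldl
      (fun comp key =>
        if 0 < (pvMapVals P d).getD key 0 then
          let comp2 := comp ++ key
          if !((pvMapVals P d).getD key 0 == 1) then comp2 ++ PySem.Int.toStr ((pvMapVals P d).getD key 0) else comp2
        else comp) ""
    = (PySem.List.sorted d.keys id).foldl
      (fun comp key =>
        let c := PySem.Int.floordiv (d.getD key 0) P
        if 0 < c then
          let comp2 := comp ++ key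
          if !(c == 1) then comp2 ++ PySem.Int.toStr c else comp2
        else comp) "" := by
  rw [pv_keys_mapVals]
  apply PySem.List.foldl_congr_mem
  intro comp key hkey
  have hk : key ∈ d.keys := ((PySem.List.sorted_perm d.keys id false).mem_iff).mp hkey
  rw [pv_getD_mapVals P d key hk]

theorem pv_compose_skip (d : PySem.Dict String Int)
    (f : String → String → String)
    (cond : String → Prop) [DecidablePred cond] (hc : ∀ key ∈ d.keys, ¬ cond key) :
    (PySem.List.sorted d.keys id).foldl
      (fun comp key => if cond key then f comp key else comp) "" = "" := by
  rw [PySem.List.foldl_congr_mem _ _ (fun acc _ => acc) _ ?_, PySem.List.foldl_ignore]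
  intro acc x hx
  rw [if_neg (hc x (((PySem.List.sorted_perm d.keys id false).mem_iff).mp hx))]

theorem pv_getD_mem_values (d : PySem.Dict String Int) (k : String) (hk : k ∈ d.keys) :
    d.getD k 0 ∈ d.values := by
  obtain ⟨v, hv⟩ := pv_get?_of_mem_keys d k hk
  rw [PySem.Dict.getD_eq_get?_getD, hv]
  obtain ⟨l⟩ := d
  exact pv_get?_mem_values l k v hv

theorem pv_values_sub : ∀ (pairs : List (String × Int)) (d : PySem.Dict String Int) (v : Int),
    v ∈ (pairs.foldl (fun d sc => d.insert sc.1 sc.2) d).values →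
      v ∈ d.values ∨ v ∈ pairs.map (fun sc => sc.2) := by
  intro pairs
  induction pairs with
  | nil => intro d v h; exact Or.inl h
  | cons sc pairs ih =>
    intro d v h
    rw [List.foldl_cons] at h
    rcases ih (d.insert sc.1 sc.2) v h with h' | h'
    · rcases PySem.Dict.mem_values_insert d sc.1 sc.2 v h' with h'' | h''
      · exact Or.inr (by simp [h''])
      · exact Or.inl h''
    · exact Or.inr (by simp; right; simpa using h')

theorem pv_build_keys_ne (s : String) (c : Int) (rest : List (String × Int)) :
    (((s,c) :: rest).foldl (fun d sc => d.insert sc.1 sc.2) PySem.Dict.empty).keys ≠ [] := by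
  have hkeys := PySem.Dict.keys_foldl_insert_key ((s,c) :: rest) (fun sc => sc.1)
    (fun _ sc => sc.2) PySem.Dict.empty
  rw [hkeys]
  intro hnil
  have : s ∈ PySem.Set.update (PySem.Dict.empty : PySem.Dict String Int).keys
      (((s,c) :: rest).map (fun sc => sc.1)) := by
    rw [PySem.Set.mem_update]
    exact Or.inr (by simp)
  rw [hnil] at this
  exact List.not_mem_nil this

theorem pv_main (symbols : List String) (counts : List Int)
    (hdom : Dom_composition_str symbols counts)
    (hne : symbols ≠ []) (hlen : symbols.length ≤ counts.length) :
    composition_str symbols counts = composition_str_alt symbols counts := by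
  have hbuild := pv_build_eq symbols counts hlen
  set SD := (symbols.zip counts).foldl (fun d sc => d.insert sc.1 sc.2) PySem.Dict.empty with hSD
  -- facts about SD
  have hkne : SD.keys ≠ [] := by
    cases symbols with
    | nil => exact absurd rfl hne
    | cons s ss =>
      cases counts with
      | nil => simp at hlen
      | cons c cs => exact pv_build_keys_ne s c (ss.zip cs)
  have hvne : SD.values ≠ [] := by
    intro hv
    apply hkne
    have h1 : SD.items.map (fun x => x.2) = [] := hv
    have h2 : SD.items = [] := List.map_eq_nil_iff.mp h1
    show SD.items.map (fun x => x.1) = []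
    rw [h2]
    rfl
  have hbound : ∀ v ∈ SD.values, v ≤ 2147483648 := by
    intro v hv
    rcases pv_values_sub (symbols.zip counts) PySem.Dict.empty v hv with h | h
    · cases h
    · obtain ⟨sc, hsc, rfl⟩ := List.mem_map.mp h
      obtain ⟨a, b⟩ := sc
      have hcmem : b ∈ counts := (List.of_mem_zip hsc).2
      unfold Dom_composition_str at hdom
      rw [Bool.and_eq_true] at hdom
      have := List.all_eq_true.mp hdom.2 b hcmem
      unfold pvDomInt at this
      have := of_decide_eq_true this
      omega
  have hgdv := pv_gcdB_dvd SD.values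
  have hggr : ∀ c : Int, (∀ v ∈ SD.values, c ∣ v) → c ∣ pvGcdB SD.values :=
    fun c h => pv_dvd_gcdB SD.values c h
  have hval : ∀ key ∈ SD.keys, SD.getD key 0 ∈ SD.values := pv_getD_mem_values SD
  by_cases hpos : ∃ v ∈ SD.values, 0 < v
  · -- some positive count: A divides by P, B divides by the same P
    obtain ⟨v0, hv0m, hv0⟩ := hpos
    have hglt : (pvGcdB SD.values).toNat < 2^64 := by
      have h1 : pvGcdB SD.values ≤ v0 := Int.le_of_dvd hv0 (hgdv v0 hv0m)
      have h2 := hbound v0 hv0m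
      have h3 : (2:Nat)^64 = 18446744073709551616 := by norm_num
      omega
    obtain ⟨P, hP, hPd, hBfold, hAloop⟩ := pv_outer pvPrimes (by decide) (by decide) SD
      (pvGcdB SD.values) (pv_gcdB_nonneg _) hglt hgdv hggr ⟨v0, hv0m, hv0⟩ 1
    have hB : pvLoopB pvPrimes (pvGcdB SD.values) = (pvGcdB SD.values / P, 1 * P) := hBfold
    show (PySem.List.sorted (pvLoopA pvPrimes (pvBuildA symbols counts)).keys id).foldl _ ""
        = (PySem.List.sorted SD.keys id).foldl _ ""
    rw [hbuild, hAloop, hB]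
    simp only [one_mul]
    exact pv_compose_eq SD P hP (fun v hv => dvd_trans hPd (hgdv v hv))
  · -- all counts nonpositive: both sides build the empty composition
    push_neg at hpos
    obtain ⟨m, hm⟩ : ∃ m, PySem.List.max? SD.values id = some m := by
      cases h : PySem.List.max? SD.values id with
      | none => exact absurd ((PySem.List.max?_eq_none_iff _ _).mp h) hvne
      | some m => exact ⟨m, rfl⟩
    have hm0 : m ≤ 0 := hpos m (PySem.List.max?_mem hm)
    have hAid : pvLoopA pvPrimes SD = SD := by
      show (match PySem.List.max? SD.values id with
        | none => SD
        | some m => if m < 2 then SD else pvLoopA [3,5,7,11,13,17,19,23,29,31,37,41,43,47]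
            (pvStripA 2 64 SD)) = SD
      rw [hm]
      show (if m < 2 then SD else pvLoopA [3,5,7,11,13,17,19,23,29,31,37,41,43,47]
          (pvStripA 2 64 SD)) = SD
      rw [if_pos (by omega)]
    have hdd : 0 < (pvLoopB pvPrimes (pvGcdB SD.values)).2 :=
      pv_loopB_pos pvPrimes (by decide) (pvGcdB SD.values) 1 one_pos
    show (PySem.List.sorted (pvLoopA pvPrimes (pvBuildA symbols counts)).keys id).foldl _ ""
        = (PySem.List.sorted SD.keys id).foldl _ ""
    rw [hbuild, hAid]
    rw [pv_compose_skip SD _ (fun key => 0 < SD.getD key 0) ?_,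
      pv_compose_skip SD _ (fun key =>
        0 < PySem.Int.floordiv (SD.getD key 0) (pvLoopB pvPrimes (pvGcdB SD.values)).2) ?_]
    · intro key hk
      have hv := hpos _ (hval key hk)
      intro hcon
      have h1 : (1:Int) ≤ PySem.Int.floordiv (SD.getD key 0)
          (pvLoopB pvPrimes (pvGcdB SD.values)).2 := hcon
      rw [PySem.Int.le_floordiv_iff_mul_le hdd] at h1
      omega
    · intro key hk
      have hv := hpos _ (hval key hk)
      omega

-- ===== VERDICT (by name: the statement is the Claim_ definition above) =====
theorem composition_str_spec : Claim_equal_composition_str := by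
  intro symbols counts hdom hpre
  exact pv_main symbols counts hdom hpre.1 hpre.2
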